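-- pv_equiv track=rewrite | github.com/TrustyWatersports/stoke | update-headers.py | replace_header_block
-- ===== SOURCE A (Python) =====
-- def replace_header_block(content, new_header):
--     """Find <div class="header"> ... </div> and replace it."""
--     start_token = '  <div class="header">'
--     start = content.find(start_token)
--     if start == -1:
--         return None, "header start not found"
--
--     # Walk forward counting div depth to find matching close
--     depth = 0
--     i = start
--     end = -1
--     while i < len(content) - 5:
--         if content[i:i+4] == '<div':
--             depth += 1
--         elif content[i:i+6] == '</div>':
--             depth -= 1
--             if depth == 0:
--                 end = i + 6
--                 break
--         i += 1
--
--     if end == -1: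
--         return None, "header end not found"
--
--     new_content = content[:start] + new_header + content[end:]
--     return new_content, None
-- ===== SOURCE B (Python) =====
-- def replace_header_block(content, new_header):
--     """Find <div class="header"> ... </div> and replace it.
--
--     The matching close is located declaratively: it is the first '</div>'
--     after the header start for which the region scanned so far contains
--     equally many '<div' openings and '</div>' closings.
--     """
--     start = content.find('  <div class="header">')
--     if start == -1:
--         return None, "header start not found"
--
--     c = content.find('</div>', start)
--     while c != -1:
--         if content[start:c].count('<div') == content[start:c + 6].count('</div>'):
--             return content[:start] + new_header + content[c + 6:], None
--         c = content.find('</div>', c + 1)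
--
--     return None, "header end not found"
-- ===== Notes on version B (the rewrite author's own statement) =====
-- stated objective: alternative
-- what changed: Replaces A's stateful per-character depth-counter walk with a declarative search: iterate the candidate '</div>' positions via str.find and accept the first one at which the region's '<div' count equals its '</div>' count (computed by str.count on slices), with no running depth state at all.
import Mathlib
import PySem

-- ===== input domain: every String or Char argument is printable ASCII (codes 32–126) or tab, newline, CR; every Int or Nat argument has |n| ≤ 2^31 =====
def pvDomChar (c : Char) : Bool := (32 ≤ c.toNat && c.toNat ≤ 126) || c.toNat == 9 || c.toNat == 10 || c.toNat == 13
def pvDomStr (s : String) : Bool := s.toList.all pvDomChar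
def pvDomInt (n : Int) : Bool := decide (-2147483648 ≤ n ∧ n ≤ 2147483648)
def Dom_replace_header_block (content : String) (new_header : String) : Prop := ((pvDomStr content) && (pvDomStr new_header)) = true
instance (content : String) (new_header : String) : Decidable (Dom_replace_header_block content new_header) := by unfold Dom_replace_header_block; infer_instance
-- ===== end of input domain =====

-- B locates the matching close declaratively (first '</div>' where slice token counts balance, via find/count) instead of A's per-character depth-counter walk (objective: alternative, same return values).


-- ===== PORT A =====
def pvStartTok : List Char := "  <div class=\"header\">".toList
def pvOpenTok : List Char := ['<', 'd', 'i', 'v']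
def pvCloseTok : List Char := ['<', '/', 'd', 'i', 'v', '>']

-- the while loop of A: walk i forward while i < len(content) - 5, counting div depth; returns end (or -1)
def pvALoop (s : List Char) (depth : Int) (i : Nat) : Int :=
  if h : (i : Int) < (s.length : Int) - 5 then
    if PySem.List.slice s (some (i : Int)) (some ((i : Int) + 4)) = pvOpenTok then
      pvALoop s (depth + 1) (i + 1)
    else if PySem.List.slice s (some (i : Int)) (some ((i : Int) + 6)) = pvCloseTok then
      if depth - 1 = 0 then (i : Int) + 6
      else pvALoop s (depth - 1) (i + 1)
    else pvALoop s depth (i + 1)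
  else -1
termination_by s.length - i
decreasing_by all_goals omega

def replace_header_block (content : String) (new_header : String) : Option String × Option String :=
  let cs := content.toList
  let start := PySem.Chars.find cs pvStartTok
  if start = -1 then (none, some "header start not found")
  else
    let e := pvALoop cs 0 start.toNat
    if e = -1 then (none, some "header end not found")
    else (some (String.ofList (PySem.List.slice cs none (some start) ++ new_header.toList ++ PySem.List.slice cs (some e) none)), none)

-- ===== PORT B =====
-- B's while loop over candidate close positions: c is the current '</div>' position
-- (or -1 = not found, as Python's find returns); accept c when the slice token counts
-- balance, else move to the next close.  The Nat argument is a termination fuel only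
-- (each iteration moves c strictly forward, so cs.length + 1 steps always suffice).
def pvBLoop (cs : List Char) (start : Nat) : Nat → Int → Int
  | 0, _ => -1
  | fuel + 1, c =>
    if c = -1 then -1
    else if PySem.Chars.count (PySem.List.slice cs (some (start : Int)) (some c)) pvOpenTok
          = PySem.Chars.count (PySem.List.slice cs (some (start : Int)) (some (c + 6))) pvCloseTok
    then c + 6
    else pvBLoop cs start fuel (PySem.Chars.findFrom cs pvCloseTok (c + 1) none)

def replace_header_block_alt (content : String) (new_header : String) : Option String × Option String :=
  let cs := content.toList
  let start := PySem.Chars.find cs pvStartTok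
  if start = -1 then (none, some "header start not found")
  else
    let e := pvBLoop cs start.toNat (cs.length + 1) (PySem.Chars.findFrom cs pvCloseTok start none)
    if e = -1 then (none, some "header end not found")
    else (some (String.ofList (PySem.List.slice cs none (some start) ++ new_header.toList ++ PySem.List.slice cs (some e) none)), none)

-- ===== PRECONDITION & SPEC =====
def Spec_replace_header_block (content : String) (new_header : String) (out : Option String × Option String) : Prop := out = replace_header_block_alt content new_header
instance (content : String) (new_header : String) (out : Option String × Option String) : Decidable (Spec_replace_header_block content new_header out) := by unfold Spec_replace_header_block; infer_instance

-- ===== CLAIM (what is proved, stated in full; the proofs are below) =====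
def Claim_equal_replace_header_block : Prop := ∀ (content : String) (new_header : String), Dom_replace_header_block content new_header → Spec_replace_header_block content new_header (replace_header_block content new_header)

-- ===== LEMMAS AND PROOFS =====

-- the two tokens cannot both be prefixes of the same suffix
theorem pvTok_excl {l : List Char} (ho : pvOpenTok <+: l) (hc : pvCloseTok <+: l) : False := by
  obtain ⟨t, ht⟩ := ho
  obtain ⟨u, hu⟩ := hc
  rw [← ht] at hu
  simp [pvOpenTok, pvCloseTok] at hu

-- a length-n take equals a length-n token iff the token is a prefix and fits
theorem pvTake_tok (l tok : List Char) (n : Nat) (hn : tok.length = n) :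
    l.take n = tok ↔ (tok <+: l ∧ n ≤ l.length) := by
  constructor
  · intro h
    have hlen : (l.take n).length = tok.length := by rw [h]
    rw [List.length_take, hn] at hlen
    have hle : n ≤ l.length := by omega
    exact ⟨by rw [List.prefix_iff_eq_take, hn, h], hle⟩
  · rintro ⟨hpre, hle⟩
    rw [List.prefix_iff_eq_take, hn] at hpre
    exact hpre.symm

-- A's 4-char slice test is the open-token prefix test
theorem pvSlice_open (s : List Char) (i : Nat) :
    PySem.List.slice s (some (i : Int)) (some ((i : Int) + 4)) = pvOpenTok ↔
      (pvOpenTok <+: s.drop i ∧ 4 ≤ (s.drop i).length) := by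
  have h4 : ((i : Int) + 4) = (((i + 4 : Nat)) : Int) := by push_cast; ring
  rw [h4, PySem.List.slice_natCast, show i + 4 - i = 4 from by omega]
  exact pvTake_tok _ _ _ rfl

-- A's 6-char slice test is the close-token prefix test
theorem pvSlice_close (s : List Char) (i : Nat) :
    PySem.List.slice s (some (i : Int)) (some ((i : Int) + 6)) = pvCloseTok ↔
      (pvCloseTok <+: s.drop i ∧ 6 ≤ (s.drop i).length) := by
  have h6 : ((i : Int) + 6) = (((i + 6 : Nat)) : Int) := by push_cast; ring
  rw [h6, PySem.List.slice_natCast, show i + 6 - i = 6 from by omega]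
  exact pvTake_tok _ _ _ rfl

-- an open token never starts strictly inside an open token
theorem pvNoOv_open (l : List Char) (k : Nat) (h : pvOpenTok <+: l) (h1 : 0 < k) (h2 : k < 4) :
    ¬ pvOpenTok <+: l.drop k := by
  obtain ⟨t, rfl⟩ := h
  interval_cases k <;> simp [pvOpenTok, List.cons_prefix_cons]

-- a close token never starts strictly inside a close token
theorem pvNoOv_close (l : List Char) (k : Nat) (h : pvCloseTok <+: l) (h1 : 0 < k) (h2 : k < 6) :
    ¬ pvCloseTok <+: l.drop k := by
  obtain ⟨t, rfl⟩ := h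
  interval_cases k <;> simp [pvCloseTok, List.cons_prefix_cons]

-- a close token never starts strictly inside an open token
theorem pvNoOv_openclose (l : List Char) (k : Nat) (h : pvOpenTok <+: l) (h1 : 0 < k) (h2 : k < 4) :
    ¬ pvCloseTok <+: l.drop k := by
  obtain ⟨t, rfl⟩ := h
  interval_cases k <;> simp [pvOpenTok, pvCloseTok, List.cons_prefix_cons]

-- number of positions of l at which tok is a prefix
def pvOcc (tok : List Char) : List Char → Nat
  | [] => 0
  | c :: r => (if tok <+: c :: r then 1 else 0) + pvOcc tok r

-- number of positions p ∈ [a, b) at which tok is a prefix of s.drop p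
def pvCnt (s tok : List Char) (a b : Nat) : Nat :=
  (List.range' a (b - a)).countP (fun p => decide (tok <+: s.drop p))

theorem pvCnt_self (s tok : List Char) (a : Nat) : pvCnt s tok a a = 0 := by
  simp [pvCnt]

theorem pvCnt_succ (s tok : List Char) (a b : Nat) (h : a ≤ b) :
    pvCnt s tok a (b + 1) = pvCnt s tok a b + (if tok <+: s.drop b then 1 else 0) := by
  unfold pvCnt
  rw [show b + 1 - a = (b - a) + 1 from by omega, List.range'_1_concat, List.countP_append]
  simp [show a + (b - a) = b from by omega]

theorem pvCnt_split (s tok : List Char) (a m b : Nat) (h1 : a ≤ m) (h2 : m ≤ b) :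
    pvCnt s tok a b = pvCnt s tok a m + pvCnt s tok m b := by
  unfold pvCnt
  rw [← List.countP_append]
  congr 1
  rw [show b - a = (m - a) + (b - m) from by omega, ← List.range'_append_1,
    show a + (m - a) = m from by omega]

theorem pvOcc_drop_no (tok : List Char) (m : Nat) : ∀ (l : List Char),
    (∀ k, k < m → ¬ tok <+: l.drop k) → pvOcc tok l = pvOcc tok (l.drop m) := by
  induction m with
  | zero => intro l _; rfl
  | succ m ih =>
    intro l hl
    cases l with
    | nil => simp
    | cons c r =>
      rw [pvOcc, if_neg (by simpa using hl 0 (by omega)), Nat.zero_add,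
        show (c :: r).drop (m + 1) = r.drop m from rfl]
      exact ih r (fun k hk => by simpa using hl (k + 1) (by omega))

theorem pvCount_go_eq (tok : List Char) (hne : tok ≠ [])
    (hov : ∀ (l : List Char) (k : Nat), tok <+: l → 0 < k → k < tok.length → ¬ tok <+: l.drop k) :
    ∀ (fuel : Nat) (l : List Char) (acc : Nat), l.length ≤ fuel →
    PySem.Chars.count.go tok fuel l acc = acc + pvOcc tok l := by
  intro fuel
  induction fuel with
  | zero =>
    intro l acc hl
    have : l = [] := by cases l <;> simp_all
    subst this
    simp [PySem.Chars.count.go, pvOcc]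
  | succ f ih =>
    intro l acc hl
    cases l with
    | nil => simp [PySem.Chars.count.go, pvOcc]
    | cons c r =>
      rw [PySem.Chars.count.go]
      by_cases hp : tok <+: c :: r
      · rw [if_pos (by exact List.isPrefixOf_iff_prefix.mpr hp)]
        have hlen : 0 < tok.length := by cases tok <;> simp_all
        have hdrop : ((c :: r).drop tok.length).length ≤ f := by
          simp only [List.length_drop]
          simp at hl ⊢
          omega
        rw [ih _ _ hdrop]
        have hocc : pvOcc tok (c :: r) = 1 + pvOcc tok ((c :: r).drop tok.length) := by
          rw [pvOcc, if_pos hp]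
          congr 1
          have : ∀ k, k < tok.length - 1 → ¬ tok <+: r.drop k := by
            intro k hk
            have := hov (c :: r) (k + 1) hp (by omega) (by omega)
            simpa using this
          have := pvOcc_drop_no tok (tok.length - 1) r this
          rw [this]
          congr 1
          cases tok with
          | nil => simp_all
          | cons x xs => simp
        omega
      · rw [if_neg (by simpa [List.isPrefixOf_iff_prefix] using hp)]
        rw [ih r acc (by simp at hl; omega)]
        rw [pvOcc, if_neg hp]
        omega

-- PySem's non-overlapping count equals the positional count for tokens that cannot self-overlap
theorem pvCount_eq_occ (tok : List Char) (hne : tok ≠ [])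
    (hov : ∀ (l : List Char) (k : Nat), tok <+: l → 0 < k → k < tok.length → ¬ tok <+: l.drop k)
    (l : List Char) : PySem.Chars.count l tok = pvOcc tok l := by
  rw [PySem.Chars.count, if_neg (by simpa using hne)]
  rw [pvCount_go_eq tok hne hov l.length l 0 (le_refl _)]; omega

-- positional count of a window as pvOcc of the slice, when no occurrence crosses the right edge
theorem pvOcc_take (tok s : List Char) (hne : tok ≠ []) : ∀ (n a : Nat),
    (∀ p, a ≤ p → p < a + n → tok <+: s.drop p → p + tok.length ≤ a + n) →
    pvOcc tok ((s.drop a).take n) = pvCnt s tok a (a + n) := by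
  intro n
  induction n with
  | zero => intro a _; simp [pvOcc, pvCnt]
  | succ n ih =>
    intro a hedge
    by_cases ha : a < s.length
    · have hdrop : s.drop a = s[a] :: s.drop (a + 1) := List.drop_eq_getElem_cons ha
      rw [hdrop, List.take_succ_cons, pvOcc]
      have htail : s.drop (a + 1) = (s.drop a).drop 1 := by rw [hdrop]; rfl
      have hiff : (tok <+: s[a] :: (s.drop (a + 1)).take n) ↔ tok <+: s.drop a := by
        have : s[a] :: (s.drop (a + 1)).take n = (s.drop a).take (n + 1) := by
          rw [hdrop, List.take_succ_cons]
        rw [this]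
        constructor
        · intro h; exact h.trans (List.take_prefix _ _)
        · intro h
          rw [List.prefix_take_iff]
          refine ⟨h, ?_⟩
          have := hedge a (le_refl a) (by omega) h
          omega
      have hrange : List.range' a (a + (n + 1) - a) = a :: List.range' (a + 1) n := by
        rw [show a + (n + 1) - a = n + 1 from by omega, List.range'_succ]
      have hcnt : pvCnt s tok a (a + (n + 1))
          = (if tok <+: s.drop a then 1 else 0) + pvCnt s tok (a + 1) (a + 1 + n) := by
        unfold pvCnt
        rw [hrange, List.countP_cons]
        rw [show a + 1 + n - (a + 1) = n from by omega]
        simp only [decide_eq_true_eq]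
        split_ifs <;> omega
      rw [hcnt, ← ih (a + 1) (fun p hp1 hp2 hp3 => by
        have := hedge p (by omega) (by omega) hp3; omega)]
      congr 1
      · split_ifs with h1 h2 h2 <;> first | rfl | (exact absurd (hiff.mp h1) h2) | (exact absurd (hiff.mpr h2) h1)
    · have hnil : s.drop a = [] := by rw [List.drop_eq_nil_iff]; omega
      rw [hnil]
      have : pvCnt s tok a (a + (n + 1)) = 0 := by
        unfold pvCnt
        rw [List.countP_eq_zero]
        intro p hp
        rw [List.mem_range'_1] at hp
        have : s.drop p = [] := by rw [List.drop_eq_nil_iff]; omega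
        simp [this, List.prefix_nil, hne]
      rw [this]
      rfl

-- B's first count: opens in content[start:c], for c a close position
theorem pvCB1 (s : List Char) (a c : Nat) (hc : pvCloseTok <+: s.drop c) (ha : a ≤ c) :
    PySem.Chars.count (PySem.List.slice s (some (a : Int)) (some (c : Int))) pvOpenTok
      = pvCnt s pvOpenTok a c := by
  rw [PySem.List.slice_natCast]
  rw [pvCount_eq_occ pvOpenTok (by simp [pvOpenTok])
    (fun l k h h1 h2 => pvNoOv_open l k h h1 (by simpa [pvOpenTok] using h2))]
  have := pvOcc_take pvOpenTok s (by simp [pvOpenTok]) (c - a) a ?_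
  · rw [this, show a + (c - a) = c from by omega]
  · intro p hp1 hp2 hp3
    by_contra hlt
    have hk1 : 0 < c - p := by omega
    have hk2 : c - p < 4 := by simp [pvOpenTok] at hlt ⊢; omega
    refine pvNoOv_openclose (s.drop p) (c - p) hp3 hk1 hk2 ?_
    rw [List.drop_drop, show p + (c - p) = c from by omega]
    exact hc

-- B's second count: closes in content[start:c+6], for c a close position
theorem pvCB2 (s : List Char) (a c : Nat) (hc : pvCloseTok <+: s.drop c) (ha : a ≤ c) :
    PySem.Chars.count (PySem.List.slice s (some (a : Int)) (some ((c : Int) + 6))) pvCloseTok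
      = pvCnt s pvCloseTok a c + 1 := by
  have hcast : ((c : Int) + 6) = (((c + 6 : Nat)) : Int) := by push_cast; ring
  rw [hcast, PySem.List.slice_natCast]
  rw [pvCount_eq_occ pvCloseTok (by simp [pvCloseTok])
    (fun l k h h1 h2 => pvNoOv_close l k h h1 (by simpa [pvCloseTok] using h2))]
  have hno : ∀ p, c < p → p < c + 6 → ¬ pvCloseTok <+: s.drop p := by
    intro p hp1 hp2 hpre
    refine pvNoOv_close (s.drop c) (p - c) hc (by omega) (by omega) ?_
    rw [List.drop_drop, show c + (p - c) = p from by omega]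
    exact hpre
  have hocc := pvOcc_take pvCloseTok s (by simp [pvCloseTok]) (c + 6 - a) a ?_
  · rw [show c + 6 - a = (c + 6) - a from rfl] at hocc
    rw [hocc, show a + (c + 6 - a) = c + 6 from by omega]
    rw [pvCnt_split s pvCloseTok a (c + 1) (c + 6) (by omega) (by omega)]
    have hz : pvCnt s pvCloseTok (c + 1) (c + 6) = 0 := by
      unfold pvCnt
      rw [List.countP_eq_zero]
      intro p hp
      rw [List.mem_range'_1] at hp
      simpa using hno p (by omega) (by omega)
    rw [hz, pvCnt_succ s pvCloseTok a c ha, if_pos hc]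
  · intro p hp1 hp2 hp3
    by_contra hlt
    have : c < p := by simp [pvCloseTok] at hlt; omega
    exact hno p this (by omega) hp3

theorem pvInfix_drop {l t : List Char} (i : Nat) (h : t <+: l.drop i) : t <:+: l :=
  List.infix_iff_prefix_suffix.mpr ⟨l.drop i, h, List.drop_suffix i l⟩

theorem pvInfix_exists {l t : List Char} (h : t <:+: l) : ∃ i, t <+: l.drop i := by
  obtain ⟨u, hp, hs⟩ := List.infix_iff_prefix_suffix.mp h
  obtain ⟨v, rfl⟩ := hs
  exact ⟨v.length, by simpa using hp⟩

-- find('</div>', i) at a hit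
theorem pvFind_hit (s : List Char) (i : Nat) (hi : i ≤ s.length) (hc : pvCloseTok <+: s.drop i) :
    PySem.Chars.findFrom s pvCloseTok (i : Int) none = (i : Int) := by
  rw [PySem.Chars.findFrom_natCast s pvCloseTok i hi]
  have h0 : 0 ≤ PySem.Chars.find (s.drop i) pvCloseTok :=
    (PySem.Chars.find_nonneg_iff _ _).mpr (pvInfix_drop 0 (by simpa using hc))
  obtain ⟨hpre, hmin⟩ := PySem.Chars.find_spec h0
  have hz : PySem.Chars.find (s.drop i) pvCloseTok = 0 := by
    by_contra hne
    exact hmin 0 (by omega) (by simpa using hc)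
  rw [hz]
  simp

-- find('</div>', i) when the tail is too short for a close token
theorem pvFind_tail (s : List Char) (i : Nat) (hi : i ≤ s.length) (h : s.length < i + 6) :
    PySem.Chars.findFrom s pvCloseTok (i : Int) none = -1 := by
  rw [PySem.Chars.findFrom_natCast_eq_neg_one_iff s pvCloseTok i hi]
  intro hin
  have := hin.length_le
  simp [pvCloseTok] at this
  omega

-- find('</div>', i) skips a position holding no close token
theorem pvFind_step (s : List Char) (i : Nat) (hi : i < s.length) (h : ¬ pvCloseTok <+: s.drop i) :
    PySem.Chars.findFrom s pvCloseTok (i : Int) none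
      = PySem.Chars.findFrom s pvCloseTok ((i : Int) + 1) none := by
  have hcast : (i : Int) + 1 = (((i + 1 : Nat)) : Int) := by push_cast; ring
  rw [hcast]
  by_cases h2 : PySem.Chars.findFrom s pvCloseTok ((i + 1 : Nat) : Int) = -1
  · rw [h2, (PySem.Chars.findFrom_natCast_eq_neg_one_iff s pvCloseTok i (by omega)).mpr ?_]
    intro hin
    obtain ⟨j, hj⟩ := pvInfix_exists hin
    rw [List.drop_drop] at hj
    cases j with
    | zero => exact h (by simpa using hj)
    | succ k =>
      refine (PySem.Chars.findFrom_natCast_eq_neg_one_iff s pvCloseTok (i + 1) (by omega)).mp h2 ?_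
      refine pvInfix_drop k ?_
      rw [List.drop_drop, show i + 1 + k = i + (k + 1) from by omega]
      exact hj
  · obtain ⟨hr2, hpre2, hmin2⟩ := PySem.Chars.findFrom_natCast_spec s pvCloseTok (i + 1) (by omega) h2
    have h1 : PySem.Chars.findFrom s pvCloseTok ((i : Nat) : Int) ≠ -1 := by
      rw [Ne, PySem.Chars.findFrom_natCast_eq_neg_one_iff s pvCloseTok i (by omega)]
      intro hno
      apply hno
      have : (i : Int) ≤ PySem.Chars.findFrom s pvCloseTok ((i + 1 : Nat) : Int) := by
        push_cast at hr2 ⊢; omega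
      refine pvInfix_drop ((PySem.Chars.findFrom s pvCloseTok ((i + 1 : Nat) : Int)).toNat - i) ?_
      rw [List.drop_drop]
      have heq : i + ((PySem.Chars.findFrom s pvCloseTok ((i + 1 : Nat) : Int)).toNat - i)
          = (PySem.Chars.findFrom s pvCloseTok ((i + 1 : Nat) : Int)).toNat := by omega
      rw [heq]
      exact hpre2
    obtain ⟨hr1, hpre1, hmin1⟩ := PySem.Chars.findFrom_natCast_spec s pvCloseTok i (by omega) h1
    set r1 := PySem.Chars.findFrom s pvCloseTok ((i : Nat) : Int) with hr1def
    set r2 := PySem.Chars.findFrom s pvCloseTok ((i + 1 : Nat) : Int) with hr2def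
    have hne1 : r1.toNat ≠ i := fun he => h (he ▸ hpre1)
    have hge1 : i + 1 ≤ r1.toNat := by
      have : (i : Int) ≤ r1 := hr1
      omega
    have : r1.toNat = r2.toNat := by
      by_contra hne
      rcases Nat.lt_or_ge r1.toNat r2.toNat with hlt | hge
      · exact hmin2 r1.toNat hge1 hlt hpre1
      · have : (i + 1 : Int) ≤ r2 := by push_cast at hr2 ⊢; omega
        exact hmin1 r2.toNat (by omega) (by omega) hpre2
    omega

-- MAIN: A's depth walk from i equals B's candidate-close loop searching from i
theorem pvMain (s : List Char) (st : Nat) : ∀ (m i : Nat) (d : Int) (fuel : Nat),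
    s.length - i ≤ m → s.length - i < fuel → st ≤ i → i ≤ s.length →
    d = (pvCnt s pvOpenTok st i : Int) - (pvCnt s pvCloseTok st i : Int) →
    pvALoop s d i = pvBLoop s st fuel (PySem.Chars.findFrom s pvCloseTok (i : Int) none) := by
  intro m
  induction m with
  | zero =>
    intro i d fuel hm hfuel hst hi hd
    rw [pvALoop, dif_neg (by omega)]
    rw [pvFind_tail s i (by omega) (by omega)]
    cases fuel with
    | zero => rfl
    | succ f => rw [pvBLoop, if_pos rfl]
  | succ m ih =>
    intro i d fuel hm hfuel hst hi hd
    by_cases hlim : (i : Int) < (s.length : Int) - 5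
    · have hi6 : i + 6 ≤ s.length := by omega
      have hilt : i < s.length := by omega
      have hdlen : 6 ≤ (s.drop i).length := by rw [List.length_drop]; omega
      have hcast : (i : Int) + 1 = (((i + 1 : Nat)) : Int) := by push_cast; ring
      rw [pvALoop, dif_pos hlim]
      by_cases hcl : pvCloseTok <+: s.drop i
      · have hopen_no : ¬ (PySem.List.slice s (some (i : Int)) (some ((i : Int) + 4)) = pvOpenTok) := by
          rw [pvSlice_open]
          rintro ⟨ho, -⟩
          exact pvTok_excl ho hcl
        rw [if_neg hopen_no, if_pos ((pvSlice_close s i).mpr ⟨hcl, hdlen⟩)]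
        rw [pvFind_hit s i (by omega) hcl]
        obtain ⟨f, rfl⟩ : ∃ f, fuel = f + 1 := ⟨fuel - 1, by omega⟩
        rw [pvBLoop]
        rw [if_neg (show ¬((i : Int) = -1) by omega)]
        have hpred : (PySem.Chars.count (PySem.List.slice s (some (st : Int)) (some (i : Int))) pvOpenTok
              = PySem.Chars.count (PySem.List.slice s (some (st : Int)) (some ((i : Int) + 6))) pvCloseTok)
            ↔ d - 1 = 0 := by
          rw [pvCB1 s st i hcl hst, pvCB2 s st i hcl hst]
          constructor <;> intro h' <;> omega
        by_cases hd0 : d - 1 = 0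
        · rw [if_pos hd0, if_pos (hpred.mpr hd0)]
        · rw [if_neg hd0, if_neg (fun hcc => hd0 (hpred.mp hcc)), hcast]
          refine ih (i + 1) (d - 1) f (by omega) (by omega) (by omega) (by omega) ?_
          rw [pvCnt_succ s pvOpenTok st i hst, pvCnt_succ s pvCloseTok st i hst,
            if_pos hcl, if_neg (fun ho => pvTok_excl ho hcl)]
          push_cast
          omega
      · have hclose_no : ¬ (PySem.List.slice s (some (i : Int)) (some ((i : Int) + 6)) = pvCloseTok) := by
          rw [pvSlice_close]
          rintro ⟨h', -⟩
          exact hcl h'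
        rw [pvFind_step s i hilt hcl, hcast]
        by_cases hop : PySem.List.slice s (some (i : Int)) (some ((i : Int) + 4)) = pvOpenTok
        · rw [if_pos hop]
          refine ih (i + 1) (d + 1) fuel (by omega) (by omega) (by omega) (by omega) ?_
          rw [pvCnt_succ s pvOpenTok st i hst, pvCnt_succ s pvCloseTok st i hst,
            if_pos ((pvSlice_open s i).mp hop).1, if_neg hcl]
          push_cast
          omega
        · rw [if_neg hop, if_neg hclose_no]
          refine ih (i + 1) d fuel (by omega) (by omega) (by omega) (by omega) ?_
          rw [pvCnt_succ s pvOpenTok st i hst, pvCnt_succ s pvCloseTok st i hst,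
            if_neg (fun ho => hop ((pvSlice_open s i).mpr ⟨ho, by omega⟩)), if_neg hcl]
          push_cast
          omega
    · rw [pvALoop, dif_neg hlim]
      rw [pvFind_tail s i (by omega) (by omega)]
      cases fuel with
      | zero => rfl
      | succ f => rw [pvBLoop, if_pos rfl]

-- ===== VERDICT (by name: the statement is the Claim_ definition above) =====
theorem replace_header_block_spec : Claim_equal_replace_header_block := by
  intro content new_header _
  unfold Spec_replace_header_block replace_header_block replace_header_block_alt
  simp only
  by_cases hs : PySem.Chars.find content.toList pvStartTok = -1
  · rw [if_pos hs, if_pos hs]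
  · rw [if_neg hs, if_neg hs]
    have hge : 0 ≤ PySem.Chars.find content.toList pvStartTok := by
      have := PySem.Chars.neg_one_le_find content.toList pvStartTok
      omega
    have hle : PySem.Chars.find content.toList pvStartTok ≤ content.toList.length :=
      PySem.Chars.find_le_length content.toList pvStartTok
    set f := PySem.Chars.find content.toList pvStartTok with hf
    have htoNat : ((f.toNat : Nat) : Int) = f := Int.toNat_of_nonneg hge
    have heq : pvALoop content.toList 0 f.toNat
        = pvBLoop content.toList f.toNat (content.toList.length + 1)
            (PySem.Chars.findFrom content.toList pvCloseTok f none) := by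
      conv_rhs => rw [← htoNat]
      exact pvMain content.toList f.toNat content.toList.length f.toNat 0
        (content.toList.length + 1) (by omega) (by omega) (by omega) (by omega)
        (by rw [pvCnt_self, pvCnt_self]; simp)
    rw [heq]
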